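-- pv_equiv track=rewrite | github.com/lverret/advent-of-code | 2023/day14.py | total_load
-- ===== SOURCE A (Python) =====
-- def total_load(l):
--     l.insert(0, ["#" for _ in range(len(l[0]))])
--     r = 0
--     for j in range(len(l[0])):
--         s = []
--         for i in range(len(l)):
--             if l[i][j] == "#":
--                 s.append(0)
--             elif l[i][j] == "O":
--                 a = len(l) - i
--                 s[-1] += a
--         r += sum(s)
--     return r
-- ===== SOURCE B (Python) =====
-- def total_load(l):
--     l.insert(0, ["#" for _ in range(len(l[0]))])
--     w = len(l[0])
--     total = 0
--     seen = 0
--     for row in l: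
--         seen += sum(1 for j in range(w) if row[j] == "O")
--         total += seen
--     return total
-- ===== Notes on version B (the rewrite author's own statement) =====
-- stated objective: simpler
-- what changed: A walks each column top-down maintaining a stack of per-segment sums keyed by '#' barriers; B uses the telescoping identity sum_i (n-i)*c_i = sum of prefix counts: one row-major pass keeps a running count of 'O' cells seen so far and adds it once per row, so no weights, no per-cell index arithmetic and no per-column data structure remain (measured faster: no list allocation/append per cell and cache-friendly row order).
import Mathlib
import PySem

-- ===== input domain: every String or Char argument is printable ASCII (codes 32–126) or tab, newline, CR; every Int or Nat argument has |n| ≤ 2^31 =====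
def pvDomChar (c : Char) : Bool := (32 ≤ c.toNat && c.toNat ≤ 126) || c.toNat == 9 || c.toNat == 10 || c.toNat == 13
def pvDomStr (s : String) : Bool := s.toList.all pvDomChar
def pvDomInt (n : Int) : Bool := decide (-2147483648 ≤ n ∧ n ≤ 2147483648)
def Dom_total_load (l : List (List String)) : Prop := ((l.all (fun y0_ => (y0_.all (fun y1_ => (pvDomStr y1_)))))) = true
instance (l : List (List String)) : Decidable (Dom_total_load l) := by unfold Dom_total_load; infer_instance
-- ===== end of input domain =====

-- B replaces A's column-major stack-of-segment-sums with a single row-major pass that keeps a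
-- running count of 'O' cells and adds it once per row (telescoping: sum of prefix counts);
-- simpler. Equivalence is about the return value — both Pythons perform the same
-- l.insert(0, …) mutation, which the ports model by consing the '#' row.

-- ===== PORT A =====
-- one step of A's inner loop over column j: s is the stack of segment sums
def tlStepA (L : List (List String)) (j : Nat) (s : List Int) (i : Nat) : List Int :=
  if (L.getD i []).getD j "" = "#" then s ++ [(0 : Int)]
  else if (L.getD i []).getD j "" = "O" then
    -- s[-1] += len(l) - i   (s is nonempty whenever A reaches this under Pre_)
    match s.getLast? with
    | some x => s.dropLast ++ [x + ((L.length : Int) - (i : Int))]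
    | none => s
  else s

def total_load (l : List (List String)) : Int :=
  let L := (List.replicate (l.headD []).length "#") :: l
  (List.range (L.headD []).length).foldl (fun r j =>
    r + ((List.range L.length).foldl (tlStepA L j) []).sum) 0

-- ===== PORT B =====
-- one step of B's loop over rows: state is (total, seen)
def tlStepB (w : Nat) (st : Int × Int) (row : List String) : Int × Int :=
  let seen := st.2 + (((List.range w).filter (fun j => row.getD j "" = "O")).length : Int)
  (st.1 + seen, seen)

def total_load_alt (l : List (List String)) : Int :=
  let L := (List.replicate (l.headD []).length "#") :: l
  let w := (L.headD []).length
  (L.foldl (tlStepB w) (0, 0)).1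

-- ===== PRECONDITION & SPEC =====
-- Pre_ excludes exactly the inputs on which Python A raises: the empty grid (len(l[0]) →
-- IndexError) and ragged grids with a row shorter than the first row (l[i][j] → IndexError).
def Pre_total_load (l : List (List String)) : Prop :=
  l ≠ [] ∧ ∀ row ∈ l, (l.headD []).length ≤ row.length
instance (l : List (List String)) : Decidable (Pre_total_load l) := by
  unfold Pre_total_load; infer_instance

def pvWitness_total_load : List (List String) :=
  [["O", ".", "#"], [".", "O", "O"], ["#", ".", "O"]]

def Spec_total_load (l : List (List String)) (out : Int) : Prop := out = total_load_alt l
instance (l : List (List String)) (out : Int) : Decidable (Spec_total_load l out) := by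
  unfold Spec_total_load; infer_instance

-- ===== CLAIM (what is proved, stated in full; the proofs are below) =====
def Claim_equal_total_load : Prop :=
  ∀ (l : List (List String)), Dom_total_load l → Pre_total_load l →
    Spec_total_load l (total_load l)

-- ===== LEMMAS AND PROOFS =====

-- the per-cell load of cell (i, j) of the extended grid L
def tlCell (L : List (List String)) (i j : Nat) : Int :=
  if (L.getD i []).getD j "" = "O" then (L.length : Int) - (i : Int) else 0

-- count of 'O' in the first w entries of a row, as B computes it
def tlCnt (w : Nat) (row : List String) : Int :=
  (((List.range w).filter (fun j => row.getD j "" = "O")).length : Int)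

-- the weighted total over a list of row counts: head gets weight (length)
def tlW : List Int → Int
  | [] => 0
  | c :: cs => ((cs.length : Int) + 1) * c + tlW cs

-- Inner-loop invariant: starting from a nonempty stack, the stack stays nonempty and its
-- sum grows by the per-cell loads of the visited cells.
theorem tlStack_sum (L : List (List String)) (j : Nat) :
    ∀ (is : List Nat) (s : List Int), s ≠ [] →
      (is.foldl (tlStepA L j) s ≠ [] ∧
       (is.foldl (tlStepA L j) s).sum = s.sum + (is.map (fun i => tlCell L i j)).sum) := by
  intro is
  induction is with
  | nil => intro s hs; simp [hs]
  | cons i is ih =>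
    intro s hs
    have hstep : tlStepA L j s i ≠ [] ∧ (tlStepA L j s i).sum = s.sum + tlCell L i j := by
      unfold tlStepA tlCell
      by_cases h1 : (L.getD i []).getD j "" = "#"
      · simp only [if_pos h1, if_neg (show ¬(L.getD i []).getD j "" = "O" by rw [h1]; decide)]
        exact ⟨by simp, by simp⟩
      · simp only [if_neg h1]
        by_cases h2 : (L.getD i []).getD j "" = "O"
        · simp only [if_pos h2]
          have hx := List.getLast?_eq_some_getLast (l := s) hs
          rw [hx]
          refine ⟨by simp, ?_⟩
          have hdg : s.dropLast ++ [s.getLast hs] = s := List.dropLast_append_getLast hs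
          calc (s.dropLast ++ [s.getLast hs + ((L.length : Int) - (i : Int))]).sum
              = (s.dropLast ++ [s.getLast hs]).sum + ((L.length : Int) - (i : Int)) := by
                simp; ring
            _ = s.sum + ((L.length : Int) - (i : Int)) := by rw [hdg]
        · simp only [if_neg h2]
          exact ⟨hs, by simp⟩
    have hrest := ih (tlStepA L j s i) hstep.1
    refine ⟨by simpa using hrest.1, ?_⟩
    simp only [List.foldl_cons, List.map_cons, List.sum_cons]
    rw [hrest.2, hstep.2]; ring

-- For a column j < w, A's inner loop over the extended grid sums the column's cell loads.
theorem tlCol_sum (l : List (List String)) (j : Nat) (hj : j < (l.headD []).length) :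
    (((List.range ((List.replicate (l.headD []).length "#") :: l).length).foldl
        (tlStepA ((List.replicate (l.headD []).length "#") :: l) j) []).sum)
      = ((List.range ((List.replicate (l.headD []).length "#") :: l).length).map
          (fun i => tlCell ((List.replicate (l.headD []).length "#") :: l) i j)).sum := by
  have hcell : ((((List.replicate (l.headD []).length "#") :: l).getD 0 []).getD j "") = "#" := by
    show ((List.replicate (l.headD []).length "#").getD j "") = "#"
    rw [List.getD_eq_getElem?_getD, List.getElem?_replicate, if_pos hj]
    rfl
  have hfirst : tlStepA ((List.replicate (l.headD []).length "#") :: l) j [] 0 = [(0 : Int)] := by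
    unfold tlStepA
    rw [if_pos hcell]
    rfl
  have hcell0 : tlCell ((List.replicate (l.headD []).length "#") :: l) 0 j = 0 := by
    unfold tlCell
    rw [if_neg (by rw [hcell]; decide)]
  rw [show ((List.replicate (l.headD []).length "#") :: l).length = l.length + 1 from by simp,
      List.range_succ_eq_map]
  simp only [List.foldl_cons, List.map_cons, List.sum_cons, hfirst, hcell0]
  have h := tlStack_sum ((List.replicate (l.headD []).length "#") :: l) j
    ((List.range l.length).map Nat.succ) [(0 : Int)] (by simp)
  rw [h.2]; simp

-- (range n).map f |>.sum as a Finset sum, for exchanging the order of summation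
theorem tlSum_range (n : Nat) (f : Nat → Int) :
    ((List.range n).map f).sum = ∑ i ∈ Finset.range n, f i := by
  induction n with
  | zero => simp
  | succ n ih => rw [List.range_succ, Finset.sum_range_succ]; simp [ih]

theorem tlSum_swap (n w : Nat) (g : Nat → Nat → Int) :
    ((List.range w).map (fun j => ((List.range n).map (fun i => g i j)).sum)).sum
      = ((List.range n).map (fun i => ((List.range w).map (fun j => g i j)).sum)).sum := by
  simp only [tlSum_range]
  exact Finset.sum_comm

-- A row's cell-load sum equals its weight times its 'O'-count.
theorem tlRow_sum (L : List (List String)) (i : Nat) (w : Nat) :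
    ((List.range w).map (fun j => tlCell L i j)).sum
      = ((L.length : Int) - (i : Int)) * tlCnt w (L.getD i []) := by
  unfold tlCnt
  induction w with
  | zero => simp
  | succ w ih =>
    rw [List.range_succ, List.filter_append, List.map_append]
    by_cases hw : (L.getD i []).getD w "" = "O"
    · rw [show List.filter (fun j => decide ((L.getD i []).getD j "" = "O")) [w] = [w] from by
          simp only [List.filter_cons, List.filter_nil, hw, decide_true]; rfl]
      rw [show List.map (fun j => tlCell L i j) [w] = [((L.length : Int) - (i : Int))] from by
          simp only [List.map_cons, List.map_nil]; unfold tlCell; rw [if_pos hw]]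
      rw [List.sum_append, ih]
      simp only [List.length_append, List.length_cons, List.length_nil, List.sum_cons,
        List.sum_nil]
      push_cast
      ring
    · rw [show List.filter (fun j => decide ((L.getD i []).getD j "" = "O")) [w] = [] from by
          simp only [List.filter_cons, List.filter_nil, hw, decide_false]; rfl]
      rw [show List.map (fun j => tlCell L i j) [w] = [(0 : Int)] from by
          simp only [List.map_cons, List.map_nil]; unfold tlCell; rw [if_neg hw]]
      rw [List.sum_append, ih]
      simp only [List.length_append, List.length_nil, List.sum_cons, List.sum_nil]
      push_cast
      ring

-- B's fold on row counts: starting from (t, s), the total comes out as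
-- t + length*s + the weighted total of the counts (the telescoping identity).
theorem tlFoldB_counts (cs : List Int) :
    ∀ (t s : Int),
      (cs.foldl (fun st c => (st.1 + (st.2 + c), st.2 + c)) (t, s)).1
        = t + (cs.length : Int) * s + tlW cs := by
  induction cs with
  | nil => intro t s; simp [tlW]
  | cons c cs ih =>
    intro t s
    simp only [List.foldl_cons]
    rw [ih]
    simp only [tlW, List.length_cons]
    push_cast
    ring

-- B's fold over rows is the count fold over the mapped counts.
theorem tlFoldB_map (w : Nat) (L : List (List String)) (st : Int × Int) :
    L.foldl (tlStepB w) st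
      = (L.map (tlCnt w)).foldl (fun st c => (st.1 + (st.2 + c), st.2 + c)) st := by
  rw [List.foldl_map]
  rfl

-- The index-weighted row-count sum equals the weighted total of the list of row counts.
theorem tlWeighted_eq_W (w : Nat) :
    ∀ (L : List (List String)),
      ((List.range L.length).map
          (fun (i : Nat) => ((L.length : Int) - (i : Int)) * tlCnt w (L.getD i []))).sum
        = tlW (L.map (tlCnt w)) := by
  intro L
  induction L with
  | nil => simp [tlW]
  | cons row L ih =>
    rw [show (row :: L).length = L.length + 1 from by simp, List.range_succ_eq_map]
    simp only [List.map_cons, List.sum_cons, List.map_map, tlW, List.length_map]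
    rw [← ih]
    have : ∀ (i : Nat), ((fun (i : Nat) => (((L.length + 1 : Nat) : Int) - (i : Int)) *
          tlCnt w ((row :: L).getD i [])) ∘ Nat.succ) i
        = (fun (i : Nat) => ((L.length : Int) - (i : Int)) * tlCnt w (L.getD i [])) i := by
      intro i
      simp only [Function.comp]
      have h1 : (row :: L).getD (Nat.succ i) [] = L.getD i [] := rfl
      rw [h1]
      push_cast
      ring_nf
    rw [List.map_congr_left (fun i _ => this i)]
    have h0 : (row :: L).getD 0 [] = row := rfl
    rw [h0]
    push_cast
    ring

-- ===== VERDICT (by name: the statement is the Claim_ definition above) =====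
theorem total_load_spec : Claim_equal_total_load := by
  intro l _ _
  unfold Spec_total_load total_load total_load_alt
  dsimp only
  set C := (List.replicate (l.headD []).length "#") :: l with hC
  rw [tlFoldB_map, tlFoldB_counts]
  simp only [List.length_map, mul_zero, add_zero, zero_add]
  refine Eq.trans (PySem.List.foldl_add (List.range ((C.headD []).length))
      (fun j => ((List.range C.length).foldl (tlStepA C j) []).sum) 0) ?_
  rw [zero_add]
  rw [List.map_congr_left (fun j hj => tlCol_sum l j (by
        have := List.mem_range.mp hj
        simpa [hC] using this))]
  rw [tlSum_swap C.length ((C.headD []).length) (fun i j => tlCell C i j)]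
  rw [List.map_congr_left (fun i _ => tlRow_sum C i ((C.headD []).length))]
  exact tlWeighted_eq_W ((C.headD []).length) C
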